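-- pv_equiv track=rewrite | github.com/jlenrique/course-DEV-IDE-with-AGENTS | scripts/utilities/progress_map.py | _story_counts
-- ===== SOURCE A (Python) =====
-- from typing import Any
--
-- DONE_STATUSES = {"done"}
--
-- REVIEW_STATUSES = {"review"}
--
-- IN_PROGRESS_STATUSES = {"in-progress"}
--
-- READY_STATUSES = {"ready-for-dev", "ratified-stub"}
--
-- DEFERRED_STATUSES = {"deferred"}
--
-- BACKLOG_STATUSES = {"backlog"}
--
-- RETIRED_STATUSES = {"retired"}
--
-- def _story_counts(epic: dict[str, Any]) -> dict[str, int]: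
--     counts: dict[str, int] = {
--         "done": 0,
--         "review": 0,
--         "in_progress": 0,
--         "ready": 0,
--         "deferred": 0,
--         "backlog": 0,
--         "retired": 0,
--         "unknown": 0,
--     }
--     for val in epic["stories"].values():
--         if val in DONE_STATUSES:
--             counts["done"] += 1
--         elif val in REVIEW_STATUSES:
--             counts["review"] += 1
--         elif val in IN_PROGRESS_STATUSES:
--             counts["in_progress"] += 1
--         elif val in READY_STATUSES:
--             counts["ready"] += 1
--         elif val in DEFERRED_STATUSES:
--             counts["deferred"] += 1
--         elif val in BACKLOG_STATUSES:
--             counts["backlog"] += 1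
--         elif val in RETIRED_STATUSES:
--             counts["retired"] += 1
--         else:
--             counts["unknown"] += 1
--     return counts
-- ===== SOURCE B (Python) =====
-- def _story_counts(epic):
--     vals = list(epic["stories"].values())
--     counts = {
--         "done": vals.count("done"),
--         "review": vals.count("review"),
--         "in_progress": vals.count("in-progress"),
--         "ready": vals.count("ready-for-dev") + vals.count("ratified-stub"),
--         "deferred": vals.count("deferred"),
--         "backlog": vals.count("backlog"),
--         "retired": vals.count("retired"),
--     }
--     counts["unknown"] = len(vals) - sum(counts.values())
--     return counts
-- ===== Notes on version B (the rewrite author's own statement) =====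
-- stated objective: alternative
-- what changed: Replaces A's single pass with an eight-way if/elif classification per story by staged whole-list counting: one list.count pass per known status (ready as the sum of two counts) and the unknown bucket computed arithmetically as len minus the sum of the known counts, with no per-item branching at all.
import Mathlib
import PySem

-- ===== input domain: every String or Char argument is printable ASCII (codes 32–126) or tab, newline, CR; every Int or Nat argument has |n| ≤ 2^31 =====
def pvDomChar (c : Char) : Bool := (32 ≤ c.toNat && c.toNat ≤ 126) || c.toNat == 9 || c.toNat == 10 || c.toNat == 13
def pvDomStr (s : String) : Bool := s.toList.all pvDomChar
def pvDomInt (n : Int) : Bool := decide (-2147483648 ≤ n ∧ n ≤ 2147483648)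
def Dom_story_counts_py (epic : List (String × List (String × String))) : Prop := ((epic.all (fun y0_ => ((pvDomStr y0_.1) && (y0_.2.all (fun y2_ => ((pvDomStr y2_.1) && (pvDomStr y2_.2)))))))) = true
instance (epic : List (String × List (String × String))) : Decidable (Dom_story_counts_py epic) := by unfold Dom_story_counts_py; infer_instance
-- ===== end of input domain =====

-- B replaces A's per-item if/elif classification loop by staged whole-list counting passes
-- (one list.count per known status, ready = sum of two counts, unknown = len - known) (objective: alternative; same cost).

-- ===== PORT A =====
def pvDoneSet : PySem.Set String := PySem.Set.ofList ["done"]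
def pvReviewSet : PySem.Set String := PySem.Set.ofList ["review"]
def pvInProgressSet : PySem.Set String := PySem.Set.ofList ["in-progress"]
def pvReadySet : PySem.Set String := PySem.Set.ofList ["ready-for-dev", "ratified-stub"]
def pvDeferredSet : PySem.Set String := PySem.Set.ofList ["deferred"]
def pvBacklogSet : PySem.Set String := PySem.Set.ofList ["backlog"]
def pvRetiredSet : PySem.Set String := PySem.Set.ofList ["retired"]

-- counts[k] += 1 on an always-present key k: Dict.modify k 0 (· + 1) is exact here
def pvStepA (counts : PySem.Dict String Int) (val : String) : PySem.Dict String Int :=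
  if pvDoneSet.contains val then counts.modify "done" 0 (· + 1)
  else if pvReviewSet.contains val then counts.modify "review" 0 (· + 1)
  else if pvInProgressSet.contains val then counts.modify "in_progress" 0 (· + 1)
  else if pvReadySet.contains val then counts.modify "ready" 0 (· + 1)
  else if pvDeferredSet.contains val then counts.modify "deferred" 0 (· + 1)
  else if pvBacklogSet.contains val then counts.modify "backlog" 0 (· + 1)
  else if pvRetiredSet.contains val then counts.modify "retired" 0 (· + 1)
  else counts.modify "unknown" 0 (· + 1)

def story_counts_py (epic : List (String × List (String × String))) : List (String × Int) :=
  let counts : PySem.Dict String Int :=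
    PySem.Dict.ofList [("done", 0), ("review", 0), ("in_progress", 0), ("ready", 0),
      ("deferred", 0), ("backlog", 0), ("retired", 0), ("unknown", 0)]
  match (PySem.Dict.ofList epic).get? "stories" with
  | none => []   -- Python: KeyError; excluded by Pre_
  | some stories => ((PySem.Dict.ofList stories).values.foldl pvStepA counts).items

-- ===== PORT B =====
def story_counts_py_alt (epic : List (String × List (String × String))) : List (String × Int) :=
  match (PySem.Dict.ofList epic).get? "stories" with
  | none => []   -- Python: KeyError; excluded by Pre_
  | some stories =>
    let vals := (PySem.Dict.ofList stories).values
    let cdone : Int := PySem.List.count vals "done"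
    let creview : Int := PySem.List.count vals "review"
    let cinprog : Int := PySem.List.count vals "in-progress"
    let cready : Int := PySem.List.count vals "ready-for-dev" + PySem.List.count vals "ratified-stub"
    let cdef : Int := PySem.List.count vals "deferred"
    let cback : Int := PySem.List.count vals "backlog"
    let cret : Int := PySem.List.count vals "retired"
    let known : Int := cdone + creview + cinprog + cready + cdef + cback + cret
    [("done", cdone), ("review", creview), ("in_progress", cinprog), ("ready", cready),
     ("deferred", cdef), ("backlog", cback), ("retired", cret),
     ("unknown", (vals.length : Int) - known)]

-- ===== PRECONDITION & SPEC =====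
-- Pre_: the epic dict must carry the "stories" key (otherwise A raises KeyError)
def Pre_story_counts_py (epic : List (String × List (String × String))) : Prop :=
  "stories" ∈ epic.map Prod.fst
instance (epic : List (String × List (String × String))) : Decidable (Pre_story_counts_py epic) := by
  unfold Pre_story_counts_py; infer_instance

def pvWitness_story_counts_py : (List (String × List (String × String))) :=
  [("stories", [("S1", "done"), ("S2", "weird")])]

def Spec_story_counts_py (epic : List (String × List (String × String))) (out : List (String × Int)) : Prop := out = story_counts_py_alt epic
instance (epic : List (String × List (String × String))) (out : List (String × Int)) : Decidable (Spec_story_counts_py epic out) := by unfold Spec_story_counts_py; infer_instance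

-- ===== CLAIM (what is proved, stated in full; the proofs are below) =====
def Claim_equal_story_counts_py : Prop := ∀ (epic : List (String × List (String × String))), Dom_story_counts_py epic → Pre_story_counts_py epic → Spec_story_counts_py epic (story_counts_py epic)

-- ===== LEMMAS AND PROOFS =====

def pvKeys : List String :=
  ["done", "review", "in_progress", "ready", "deferred", "backlog", "retired", "unknown"]

-- the status→counter-key classification A's cascade performs
def pvClassify (v : String) : String :=
  if v = "done" then "done"
  else if v = "review" then "review"
  else if v = "in-progress" then "in_progress"
  else if v = "ready-for-dev" then "ready"
  else if v = "ratified-stub" then "ready"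
  else if v = "deferred" then "deferred"
  else if v = "backlog" then "backlog"
  else if v = "retired" then "retired"
  else "unknown"

theorem pvDoneSet_eq : pvDoneSet = ["done"] := rfl
theorem pvReviewSet_eq : pvReviewSet = ["review"] := rfl
theorem pvInProgressSet_eq : pvInProgressSet = ["in-progress"] := rfl
theorem pvReadySet_eq : pvReadySet = ["ready-for-dev", "ratified-stub"] := rfl
theorem pvDeferredSet_eq : pvDeferredSet = ["deferred"] := rfl
theorem pvBacklogSet_eq : pvBacklogSet = ["backlog"] := rfl
theorem pvRetiredSet_eq : pvRetiredSet = ["retired"] := rfl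

-- A's if/elif cascade performs exactly one increment, at the classified key
theorem pvStepA_eq_modify (c : PySem.Dict String Int) (v : String) :
    pvStepA c v = c.modify (pvClassify v) 0 (· + 1) := by
  by_cases h1 : v = "done"; · subst h1; rfl
  by_cases h2 : v = "review"; · subst h2; rfl
  by_cases h3 : v = "in-progress"; · subst h3; rfl
  by_cases h4 : v = "ready-for-dev"; · subst h4; rfl
  by_cases h5 : v = "ratified-stub"; · subst h5; rfl
  by_cases h6 : v = "deferred"; · subst h6; rfl
  by_cases h7 : v = "backlog"; · subst h7; rfl
  by_cases h8 : v = "retired"; · subst h8; rfl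
  simp only [pvStepA, pvClassify, pvDoneSet_eq, pvReviewSet_eq, pvInProgressSet_eq,
    pvReadySet_eq, pvDeferredSet_eq, pvBacklogSet_eq, pvRetiredSet_eq, PySem.Set.contains]
  simp [h1, h2, h3, h4, h5, h6, h7, h8, Ne.symm]

theorem pvClassify_mem (v : String) : pvClassify v ∈ pvKeys := by
  unfold pvClassify pvKeys
  split_ifs <;> simp

-- the counts dict with keys pvKeys and values f
def pvMkD (f : String → Int) : PySem.Dict String Int := { items := pvKeys.map (fun k => (k, f k)) }

theorem pvModify_mkD (f : String → Int) (k0 : String) (h : k0 ∈ pvKeys) :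
    (pvMkD f).modify k0 0 (· + 1) = pvMkD (fun k => if k = k0 then f k + 1 else f k) := by
  fin_cases h <;>
    simp [pvMkD, pvKeys, PySem.Dict.modify, PySem.Dict.insert, PySem.Dict.contains,
      PySem.Dict.getD, PySem.Dict.get?, List.find?]

theorem pvFold_items (ks : List String) (f : String → Int) (h : ∀ k ∈ ks, k ∈ pvKeys) :
    (ks.foldl (fun c k => c.modify k 0 (· + 1)) (pvMkD f)).items
      = pvKeys.map (fun k => (k, f k + (ks.count k : Int))) := by
  induction ks generalizing f with
  | nil => simp [pvMkD]
  | cons k0 ks ih =>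
    rw [List.foldl_cons, pvModify_mkD f k0 (h k0 (List.mem_cons_self)),
      ih _ (fun k hk => h k (List.mem_cons_of_mem _ hk))]
    apply List.map_congr_left
    intro k _
    by_cases hk : k = k0
    · simp [hk]; omega
    · have hk' : ¬k0 = k := fun e => hk e.symm
      simp [hk, hk']

theorem pvContains_update {ν : Type} (l : List (String × ν)) (d : PySem.Dict String ν)
    (k : String) :
    (d.update l).contains k = (d.contains k || l.any (fun p => p.1 == k)) := by
  induction l generalizing d with
  | nil => simp [PySem.Dict.update]
  | cons p l ih =>
    simp only [PySem.Dict.update, List.foldl_cons] at *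
    rw [ih]
    simp [PySem.Dict.contains_insert, Bool.or_assoc, Bool.or_left_comm, BEq.comm]

-- the classified counts are the raw status counts; the unknowns complete the length
theorem pvCount_class (vals : List String) :
    (vals.map pvClassify).count "done" = vals.count "done" ∧
    (vals.map pvClassify).count "review" = vals.count "review" ∧
    (vals.map pvClassify).count "in_progress" = vals.count "in-progress" ∧
    (vals.map pvClassify).count "ready" = vals.count "ready-for-dev" + vals.count "ratified-stub" ∧
    (vals.map pvClassify).count "deferred" = vals.count "deferred" ∧
    (vals.map pvClassify).count "backlog" = vals.count "backlog" ∧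
    (vals.map pvClassify).count "retired" = vals.count "retired" ∧
    (vals.map pvClassify).count "unknown"
      + (vals.count "done" + vals.count "review" + vals.count "in-progress"
        + (vals.count "ready-for-dev" + vals.count "ratified-stub")
        + vals.count "deferred" + vals.count "backlog" + vals.count "retired")
      = vals.length := by
  induction vals with
  | nil => simp
  | cons v vs ih =>
    obtain ⟨i1, i2, i3, i4, i5, i6, i7, i8⟩ := ih
    by_cases h1 : v = "done"
    · subst h1; refine ⟨?_, ?_, ?_, ?_, ?_, ?_, ?_, ?_⟩ <;>
        simp [pvClassify, i1, i2, i3, i4, i5, i6, i7] <;> omega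
    by_cases h2 : v = "review"
    · subst h2; refine ⟨?_, ?_, ?_, ?_, ?_, ?_, ?_, ?_⟩ <;>
        simp [pvClassify, i1, i2, i3, i4, i5, i6, i7] <;> omega
    by_cases h3 : v = "in-progress"
    · subst h3; refine ⟨?_, ?_, ?_, ?_, ?_, ?_, ?_, ?_⟩ <;>
        simp [pvClassify, i1, i2, i3, i4, i5, i6, i7] <;> omega
    by_cases h4 : v = "ready-for-dev"
    · subst h4; refine ⟨?_, ?_, ?_, ?_, ?_, ?_, ?_, ?_⟩ <;>
        simp [pvClassify, i1, i2, i3, i4, i5, i6, i7] <;> omega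
    by_cases h5 : v = "ratified-stub"
    · subst h5; refine ⟨?_, ?_, ?_, ?_, ?_, ?_, ?_, ?_⟩ <;>
        simp [pvClassify, i1, i2, i3, i4, i5, i6, i7] <;> omega
    by_cases h6 : v = "deferred"
    · subst h6; refine ⟨?_, ?_, ?_, ?_, ?_, ?_, ?_, ?_⟩ <;>
        simp [pvClassify, i1, i2, i3, i4, i5, i6, i7] <;> omega
    by_cases h7 : v = "backlog"
    · subst h7; refine ⟨?_, ?_, ?_, ?_, ?_, ?_, ?_, ?_⟩ <;>
        simp [pvClassify, i1, i2, i3, i4, i5, i6, i7] <;> omega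
    by_cases h8 : v = "retired"
    · subst h8; refine ⟨?_, ?_, ?_, ?_, ?_, ?_, ?_, ?_⟩ <;>
        simp [pvClassify, i1, i2, i3, i4, i5, i6, i7] <;> omega
    · have hc : pvClassify v = "unknown" := by
        simp [pvClassify, h1, h2, h3, h4, h5, h6, h7, h8]
      refine ⟨?_, ?_, ?_, ?_, ?_, ?_, ?_, ?_⟩ <;>
        simp [hc, i1, i2, i3, i4, i5, i6, i7, h1, h2, h3, h4, h5, h6, h7, h8] <;>
        omega

-- ===== VERDICT (by name: the statement is the Claim_ definition above) =====
theorem story_counts_py_spec : Claim_equal_story_counts_py := by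
  unfold Claim_equal_story_counts_py
  intro epic _ hpre
  unfold Spec_story_counts_py
  cases h : (PySem.Dict.ofList epic).get? "stories" with
  | none =>
    exfalso
    have hc : (PySem.Dict.ofList epic).contains "stories" = false := by
      rw [PySem.Dict.contains_eq_isSome_get?, h]; rfl
    rw [PySem.Dict.ofList, pvContains_update] at hc
    unfold Pre_story_counts_py at hpre
    rcases List.mem_map.mp hpre with ⟨p, hp, hfst⟩
    simp only [PySem.Dict.empty, PySem.Dict.contains, List.any_nil, Bool.false_or,
      List.any_eq_false] at hc
    exact hc p hp (by simp [hfst])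
  | some stories =>
    simp only [story_counts_py, story_counts_py_alt, h]
    generalize (PySem.Dict.ofList stories).values = vals
    have hstep : pvStepA = fun c v => c.modify (pvClassify v) 0 (· + 1) :=
      funext fun c => funext fun v => pvStepA_eq_modify c v
    rw [hstep, ← List.foldl_map (f := pvClassify)
      (g := fun (c : PySem.Dict String Int) k => c.modify k 0 (· + 1))]
    have hcounts : PySem.Dict.ofList [("done", (0:Int)), ("review", 0), ("in_progress", 0),
        ("ready", 0), ("deferred", 0), ("backlog", 0), ("retired", 0), ("unknown", 0)]
        = pvMkD (fun _ => 0) := by decide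
    have hmem : ∀ k ∈ vals.map pvClassify, k ∈ pvKeys := by
      intro k hk
      rcases List.mem_map.mp hk with ⟨v, _, rfl⟩
      exact pvClassify_mem v
    rw [hcounts, pvFold_items _ _ hmem]
    obtain ⟨i1, i2, i3, i4, i5, i6, i7, i8⟩ := pvCount_class vals
    simp only [pvKeys, List.map_cons, List.map_nil, PySem.List.count_eq, List.cons.injEq,
      Prod.mk.injEq, i1, i2, i3, i4, i5, i6, i7]
    and_intros
    all_goals try exact trivial
    all_goals omega
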